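-- pv_equiv track=rewrite | github.com/fnaeher/DHTTrialsRep | ctd_processing/data_prep.py | c_title
-- ===== SOURCE A (Python) =====
-- def c_title(title, age, gender, race, enrollment):
--     if isinstance(title, str):
--         title_lower = title.lower()
--         if title_lower in (keyword.lower() for keyword in age):
--             return 'age'
--         elif title_lower in (keyword.lower() for keyword in race):
--             return 'race'
--         elif title_lower in (keyword.lower() for keyword in gender):
--             return 'gender'
--         elif title_lower in (keyword.lower() for keyword in enrollment):
--             return 'enrollment'
--     return 'unknown'
-- ===== SOURCE B (Python) =====
-- def c_title(title, age, gender, race, enrollment):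
--     if not isinstance(title, str):
--         return 'unknown'
--     table = {}
--     for category, keywords in (('age', age), ('race', race),
--                                ('gender', gender), ('enrollment', enrollment)):
--         for keyword in keywords:
--             table.setdefault(keyword.lower(), category)
--     return table.get(title.lower(), 'unknown')
-- ===== Notes on version B (the rewrite author's own statement) =====
-- stated objective: idiomatic
-- what changed: Builds a dict index mapping each lowercased keyword to its category once (setdefault keeps the highest-priority category for keywords shared across lists), then answers with a single hash lookup instead of four sequential membership scans with branches.
import Mathlib
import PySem

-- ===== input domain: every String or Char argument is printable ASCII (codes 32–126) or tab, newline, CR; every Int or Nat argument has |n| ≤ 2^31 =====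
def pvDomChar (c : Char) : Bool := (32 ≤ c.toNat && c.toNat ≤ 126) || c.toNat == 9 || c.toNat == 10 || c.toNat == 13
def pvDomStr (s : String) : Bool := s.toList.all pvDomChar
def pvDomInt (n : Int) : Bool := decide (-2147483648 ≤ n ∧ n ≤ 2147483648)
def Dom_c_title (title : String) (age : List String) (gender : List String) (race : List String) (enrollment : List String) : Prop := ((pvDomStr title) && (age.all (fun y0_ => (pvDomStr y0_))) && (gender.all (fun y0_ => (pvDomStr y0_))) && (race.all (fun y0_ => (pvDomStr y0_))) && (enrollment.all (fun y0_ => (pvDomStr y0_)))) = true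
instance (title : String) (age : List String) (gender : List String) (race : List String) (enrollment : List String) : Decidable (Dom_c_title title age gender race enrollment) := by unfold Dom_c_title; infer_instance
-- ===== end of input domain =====

-- B replaces A's four sequential membership scans by a dict index built once
-- (setdefault: the earliest, highest-priority list wins) and a single lookup (objective: idiomatic).

-- ===== PORT A =====
-- literal transliteration of A: lower the title, then four sequential membership
-- tests against the lazily-lowered keyword lists, in A's branch order.
def c_title (title : String) (age : List String) (gender : List String) (race : List String) (enrollment : List String) : String :=
  let title_lower := PySem.Str.lower title
  if (age.map (fun keyword => PySem.Str.lower keyword)).contains title_lower then "age"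
  else if (race.map (fun keyword => PySem.Str.lower keyword)).contains title_lower then "race"
  else if (gender.map (fun keyword => PySem.Str.lower keyword)).contains title_lower then "gender"
  else if (enrollment.map (fun keyword => PySem.Str.lower keyword)).contains title_lower then "enrollment"
  else "unknown"

-- ===== PORT B =====
-- build the dict index with setdefault over the four (category, keywords) pairs, then one lookup.
def c_title_alt (title : String) (age : List String) (gender : List String) (race : List String) (enrollment : List String) : String :=
  let table :=
    [("age", age), ("race", race), ("gender", gender), ("enrollment", enrollment)].foldl
      (fun table ck =>
        ck.2.foldl (fun table keyword => table.setdefault (PySem.Str.lower keyword) ck.1) table)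
      PySem.Dict.empty
  table.getD (PySem.Str.lower title) "unknown"

-- ===== PRECONDITION & SPEC =====
def Spec_c_title (title : String) (age : List String) (gender : List String) (race : List String) (enrollment : List String) (out : String) : Prop := out = c_title_alt title age gender race enrollment
instance (title : String) (age : List String) (gender : List String) (race : List String) (enrollment : List String) (out : String) : Decidable (Spec_c_title title age gender race enrollment out) := by unfold Spec_c_title; infer_instance

-- ===== CLAIM =====
def Claim_equal_c_title : Prop := ∀ (title : String) (age : List String) (gender : List String) (race : List String) (enrollment : List String), Dom_c_title title age gender race enrollment → Spec_c_title title age gender race enrollment (c_title title age gender race enrollment)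

-- ===== LEMMAS AND PROOFS =====

-- one setdefault step: the existing binding wins, else bind to c when the key matches.
theorem get?_setdefault_step (d : PySem.Dict String String) (k c t : String) :
    (d.setdefault k c).get? t = (d.get? t).or (if k = t then some c else none) := by
  by_cases hc : d.contains k = true
  · have hd : d.setdefault k c = d := by simp [PySem.Dict.setdefault, hc]
    rw [hd]
    by_cases hk : k = t
    · subst hk
      rcases h : d.get? k with _ | v
      · rw [PySem.Dict.get?_eq_none_iff_contains] at h; simp [hc] at h
      · simp
    · simp [hk]
  · have hd : d.setdefault k c = d.insert k c := by
      simp [PySem.Dict.setdefault, PySem.Dict.insert, hc]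
    rw [hd, PySem.Dict.get?_insert]
    by_cases hk : k = t
    · subst hk
      have h : d.get? k = none := by
        rw [PySem.Dict.get?_eq_none_iff_contains]; simpa using hc
      simp [h]
    · simp [hk, Ne.symm hk]

-- characterisation of one setdefault loop: old binding wins, else first match of this list.
theorem get?_setdefault_fold (l : List String) (c t : String) (d : PySem.Dict String String) :
    (l.foldl (fun d keyword => d.setdefault (PySem.Str.lower keyword) c) d).get? t
      = (d.get? t).or
          (if (l.map (fun keyword => PySem.Str.lower keyword)).contains t then some c else none) := by
  induction l generalizing d with
  | nil => simp
  | cons k ks ih =>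
    rw [List.foldl_cons, ih, get?_setdefault_step, Option.or_assoc]
    by_cases h1 : PySem.Str.lower k = t
    · subst h1; simp
    · by_cases h2 : (ks.map (fun keyword => PySem.Str.lower keyword)).contains t = true <;>
        simp [h1, h2, Ne.symm h1]

theorem c_title_spec : Claim_equal_c_title := by
  intro title age gender race enrollment _
  unfold Spec_c_title c_title c_title_alt
  simp only [List.foldl_cons, List.foldl_nil]
  rw [PySem.Dict.getD_eq_get?_getD]
  simp only [get?_setdefault_fold, PySem.Dict.get?_empty, Option.none_or]
  split_ifs <;> simp_all
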